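-- pv_equiv track=rewrite | github.com/shubham4734singh/DarkHook_Defense | Backend/modules/document_analysis/pdf_parser.py | heuristic_scoring
-- ===== SOURCE A (Python) =====
-- WEIGHTS = {
--     # Structural findings
--     "javascript_detected"      : 40,
--     "openaction_detected"      : 35,
--     "launch_action_detected"   : 35,
--     "embedded_file_detected"   : 30,
--     "high_object_count"        : 15,
--     "encrypted_object"         : 20,
--     "acroform_detected"        : 20,
--     "xfa_form_detected"        : 25,
--
--     # Content findings
--     "phishing_keyword"         : 10,
--     "urgent_tone_detected"     : 15,
--     "financial_terms_detected" : 15,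
--     "credential_harvesting"    : 20,
--
--     # URL findings
--     "suspicious_url"           : 15,
--     "ip_based_url"             : 30,
--     "shortened_url"            : 20,
--     "suspicious_tld"           : 20,
--     "at_symbol_trick"          : 25,
--     "mismatched_anchor"        : 25,
--     "homograph_domain"         : 30,
--
--     # Image findings
--     "single_image_pdf"         : 25,
--     "clickable_image_overlay"  : 20,
--
--     # Behavioral findings
--     "base64_payload"           : 35,
--     "hex_payload"              : 30,
--     "high_entropy_string"      : 25,
--     "powershell_detected"      : 40,
--     "external_network_call"    : 30,
--     "dropper_pattern"          : 40,
--     "split_string_concat"      : 20,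
--     "embedded_executable"      : 45,
-- }
--
-- def heuristic_scoring(all_findings):
--     """
--     Takes all findings from all 3 layers.
--     Calculates weighted danger score.
--     Returns score, verdict and full breakdown.
--     """
--
--     total_score = 0
--     breakdown   = {}
--
--     for finding in all_findings:
--         weight = WEIGHTS.get(finding, 5)
--         total_score += weight
--
--         if finding in breakdown:
--             breakdown[finding]["count"] += 1
--             breakdown[finding]["score"] += weight
--         else:
--             breakdown[finding] = {
--                 "count" : 1,
--                 "score" : weight
--             }
--
--     # Cap at 100
--     total_score = min(total_score, 100)
--
--     # Verdict based on score
--     if total_score < 30: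
--         verdict = "Low Risk ✅"
--     elif total_score < 60:
--         verdict = "Medium Risk ⚠️"
--     elif total_score < 80:
--         verdict = "High Risk 🔴"
--     else:
--         verdict = "Critical — Likely Phishing ☠️"
--
--     return total_score, verdict, breakdown
-- ===== SOURCE B (Python) =====
-- from collections import Counter
--
-- WEIGHTS = {
--     "javascript_detected"      : 40,
--     "openaction_detected"      : 35,
--     "launch_action_detected"   : 35,
--     "embedded_file_detected"   : 30,
--     "high_object_count"        : 15,
--     "encrypted_object"         : 20,
--     "acroform_detected"        : 20,
--     "xfa_form_detected"        : 25,
--     "phishing_keyword"         : 10,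
--     "urgent_tone_detected"     : 15,
--     "financial_terms_detected" : 15,
--     "credential_harvesting"    : 20,
--     "suspicious_url"           : 15,
--     "ip_based_url"             : 30,
--     "shortened_url"            : 20,
--     "suspicious_tld"           : 20,
--     "at_symbol_trick"          : 25,
--     "mismatched_anchor"        : 25,
--     "homograph_domain"         : 30,
--     "single_image_pdf"         : 25,
--     "clickable_image_overlay"  : 20,
--     "base64_payload"           : 35,
--     "hex_payload"              : 30,
--     "high_entropy_string"      : 25,
--     "powershell_detected"      : 40,
--     "external_network_call"    : 30,
--     "dropper_pattern"          : 40,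
--     "split_string_concat"      : 20,
--     "embedded_executable"      : 45,
-- }
--
-- def heuristic_scoring(all_findings):
--     """Count-first rewrite: tally findings once, then build score breakdown."""
--     counts = Counter(all_findings)
--
--     breakdown = {
--         f: {"count": c, "score": c * WEIGHTS.get(f, 5)}
--         for f, c in counts.items()
--     }
--
--     total_score = min(sum(c * WEIGHTS.get(f, 5) for f, c in counts.items()), 100)
--
--     if total_score < 30:
--         verdict = "Low Risk ✅"
--     elif total_score < 60:
--         verdict = "Medium Risk ⚠️"
--     elif total_score < 80:
--         verdict = "High Risk 🔴"
--     else: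
--         verdict = "Critical — Likely Phishing ☠️"
--
--     return total_score, verdict, breakdown
-- ===== Notes on version B (the rewrite author's own statement) =====
-- stated objective: simpler
-- what changed: B tallies findings once with Counter and then builds the breakdown and total by count-times-weight in a dict comprehension, instead of A's single running accumulation that mutates each breakdown entry per occurrence.
import Mathlib
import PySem

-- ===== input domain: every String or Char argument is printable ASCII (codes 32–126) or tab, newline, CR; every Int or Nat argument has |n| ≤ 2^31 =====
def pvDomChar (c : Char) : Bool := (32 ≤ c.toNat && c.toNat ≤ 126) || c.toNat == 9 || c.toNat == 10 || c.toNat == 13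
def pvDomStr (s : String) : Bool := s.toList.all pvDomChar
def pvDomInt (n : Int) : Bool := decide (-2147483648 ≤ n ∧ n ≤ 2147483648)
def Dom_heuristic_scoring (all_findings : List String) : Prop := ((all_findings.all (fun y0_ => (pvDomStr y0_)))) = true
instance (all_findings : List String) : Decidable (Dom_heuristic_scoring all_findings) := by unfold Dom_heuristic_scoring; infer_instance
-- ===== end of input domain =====

-- B re-implements the scorer count-first (Counter, then a dict comprehension of count×weight)
-- instead of A's per-occurrence running accumulation; objective: simpler decomposition.

-- Shared module-level constant WEIGHTS (same in both Python files).
def pdfWEIGHTS : PySem.Dict String Int := PySem.Dict.ofList [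
  ("javascript_detected", 40), ("openaction_detected", 35), ("launch_action_detected", 35),
  ("embedded_file_detected", 30), ("high_object_count", 15), ("encrypted_object", 20),
  ("acroform_detected", 20), ("xfa_form_detected", 25), ("phishing_keyword", 10),
  ("urgent_tone_detected", 15), ("financial_terms_detected", 15), ("credential_harvesting", 20),
  ("suspicious_url", 15), ("ip_based_url", 30), ("shortened_url", 20), ("suspicious_tld", 20),
  ("at_symbol_trick", 25), ("mismatched_anchor", 25), ("homograph_domain", 30),
  ("single_image_pdf", 25), ("clickable_image_overlay", 20), ("base64_payload", 35),
  ("hex_payload", 30), ("high_entropy_string", 25), ("powershell_detected", 40),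
  ("external_network_call", 30), ("dropper_pattern", 40), ("split_string_concat", 20),
  ("embedded_executable", 45)]

-- ===== PORT A =====
def heuristic_scoring (all_findings : List String) : Int × String × (List (String × List (String × Int))) :=
  let st := all_findings.foldl
    (fun (st : Int × PySem.Dict String (PySem.Dict String Int)) finding =>
      let weight := pdfWEIGHTS.getD finding 5
      let total_score := st.1 + weight
      let breakdown :=
        if st.2.contains finding then
          -- breakdown[finding]["count"] += 1; breakdown[finding]["score"] += weight
          st.2.modify finding PySem.Dict.empty
            (fun inner => (inner.modify "count" 0 (· + 1)).modify "score" 0 (· + weight))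
        else
          st.2.insert finding (PySem.Dict.ofList [("count", 1), ("score", weight)])
      (total_score, breakdown))
    (0, PySem.Dict.empty)
  let total_score := min st.1 100
  let verdict :=
    if total_score < 30 then "Low Risk ✅"
    else if total_score < 60 then "Medium Risk ⚠️"
    else if total_score < 80 then "High Risk 🔴"
    else "Critical — Likely Phishing ☠️"
  (total_score, verdict, st.2.items.map (fun p => (p.1, p.2.items)))

-- ===== PORT B =====
def heuristic_scoring_alt (all_findings : List String) : Int × String × (List (String × List (String × Int))) :=
  let counts := PySem.Dict.counter all_findings
  let breakdown := counts.items.map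
    (fun p => (p.1, [("count", p.2), ("score", p.2 * pdfWEIGHTS.getD p.1 5)]))
  let total_score := min ((counts.items.map (fun p => p.2 * pdfWEIGHTS.getD p.1 5)).sum) 100
  let verdict :=
    if total_score < 30 then "Low Risk ✅"
    else if total_score < 60 then "Medium Risk ⚠️"
    else if total_score < 80 then "High Risk 🔴"
    else "Critical — Likely Phishing ☠️"
  (total_score, verdict, breakdown)

-- ===== PRECONDITION & SPEC =====
def Spec_heuristic_scoring (all_findings : List String) (out : Int × String × (List (String × List (String × Int)))) : Prop := out = heuristic_scoring_alt all_findings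
instance (all_findings : List String) (out : Int × String × (List (String × List (String × Int)))) : Decidable (Spec_heuristic_scoring all_findings out) := by unfold Spec_heuristic_scoring; infer_instance

-- ===== CLAIM (what is proved, stated in full; the proofs are below) =====
def Claim_equal_heuristic_scoring : Prop := ∀ (all_findings : List String), Dom_heuristic_scoring all_findings → Spec_heuristic_scoring all_findings (heuristic_scoring all_findings)

-- ===== LEMMAS AND PROOFS =====

-- A's per-element dict step, and the dict built by A's loop.
def pvStepA (d : PySem.Dict String (PySem.Dict String Int)) (finding : String) :
    PySem.Dict String (PySem.Dict String Int) :=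
  let weight := pdfWEIGHTS.getD finding 5
  if d.contains finding then
    d.modify finding PySem.Dict.empty
      (fun inner => (inner.modify "count" 0 (· + 1)).modify "score" 0 (· + weight))
  else
    d.insert finding (PySem.Dict.ofList [("count", 1), ("score", weight)])

def pvDictA (xs : List String) : PySem.Dict String (PySem.Dict String Int) :=
  xs.foldl pvStepA PySem.Dict.empty

-- the inner dict A holds at a key seen c > 0 times
def pvInner (c : Int) (w : Int) : PySem.Dict String Int :=
  PySem.Dict.mk [("count", c), ("score", c * w)]

set_option maxRecDepth 4000 in
lemma pvGetA (xs : List String) (v : String) :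
    (pvDictA xs).get? v =
      if xs.count v = 0 then none
      else some (pvInner (xs.count v) (pdfWEIGHTS.getD v 5)) := by
  induction xs using List.reverseRecOn generalizing v with
  | nil => simp [pvDictA, PySem.Dict.get?_empty]
  | append_singleton l x ih =>
    have hd : pvDictA (l ++ [x]) = pvStepA (pvDictA l) x := by
      simp [pvDictA, List.foldl_append]
    rw [hd]
    unfold pvStepA
    have hc : (pvDictA l).contains x = ((pvDictA l).get? x).isSome :=
      PySem.Dict.contains_eq_isSome_get? _ _
    by_cases hx : l.count x = 0
    · -- x fresh: insert branch
      have : (pvDictA l).contains x = false := by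
        rw [hc, ih x, if_pos hx]; rfl
      rw [this]
      simp only [Bool.false_eq_true, if_false]
      rw [PySem.Dict.get?_insert]
      by_cases hv : v = x
      · subst hv
        simp [List.count_append, hx]
        generalize pdfWEIGHTS.getD v 5 = w
        norm_num [pvInner, PySem.Dict.ofList, PySem.Dict.update, PySem.Dict.insert,
          PySem.Dict.contains, PySem.Dict.get?, PySem.Dict.empty]
        decide
      · rw [if_neg hv, ih v]
        have : (l ++ [x]).count v = l.count v := by
          simp only [List.count_append, List.count_singleton]
          have : ¬ x = v := fun h => hv h.symm
          simp [this]
        rw [this]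
    · -- x seen: modify branch
      have hcx : (pvDictA l).contains x = true := by
        rw [hc, ih x, if_neg hx]; rfl
      rw [hcx]
      simp only [if_true]
      rw [PySem.Dict.modify, PySem.Dict.get?_insert]
      by_cases hv : v = x
      · subst hv
        have hcnt : (l ++ [v]).count v = l.count v + 1 := by simp
        rw [if_pos rfl, hcnt]
        have hgd : (pvDictA l).getD v PySem.Dict.empty = pvInner (l.count v) (pdfWEIGHTS.getD v 5) := by
          rw [PySem.Dict.getD_eq_get?_getD, ih v, if_neg hx]; rfl
        rw [hgd]
        have : ¬ (l.count v + 1 = 0) := by omega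
        rw [if_neg this]
        congr 1
        -- compute the two modifies on the literal inner dict
        generalize pdfWEIGHTS.getD v 5 = w
        simp [pvInner, PySem.Dict.modify, PySem.Dict.insert, PySem.Dict.getD, PySem.Dict.get?,
          PySem.Dict.contains]
        ring
      · rw [if_neg hv, ih v]
        have : (l ++ [x]).count v = l.count v := by
          simp only [List.count_append, List.count_singleton]
          have : ¬ x = v := fun h => hv h.symm
          simp [this]
        rw [this]

-- each step of A's loop is an insert at the current key
def pvValA (d : PySem.Dict String (PySem.Dict String Int)) (f : String) : PySem.Dict String Int :=
  if d.contains f then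
    ((d.getD f PySem.Dict.empty).modify "count" 0 (· + 1)).modify "score" 0 (· + pdfWEIGHTS.getD f 5)
  else PySem.Dict.ofList [("count", 1), ("score", pdfWEIGHTS.getD f 5)]

lemma pvStepA_eq_insert (d : PySem.Dict String (PySem.Dict String Int)) (f : String) :
    pvStepA d f = d.insert f (pvValA d f) := by
  by_cases h : d.contains f <;> simp [pvStepA, pvValA, PySem.Dict.modify, h]

lemma pvKeysA (xs : List String) : (pvDictA xs).keys = PySem.Set.ofList xs := by
  have h : pvDictA xs = xs.foldl (fun d x => d.insert x (pvValA d x)) PySem.Dict.empty := by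
    unfold pvDictA
    exact PySem.List.foldl_congr_mem xs _ _ _ (fun acc x _ => pvStepA_eq_insert acc x)
  rw [h, PySem.Dict.keys_foldl_insert]
  simp [PySem.Dict.keys_empty, PySem.Set.update_nil_left]

lemma pvNodupA (xs : List String) : (pvDictA xs).keys.Nodup := by
  rw [pvKeysA]; exact PySem.Set.nodup_ofList xs

lemma pvItemsA (xs : List String) :
    (pvDictA xs).items =
      (PySem.Set.ofList xs).map
        (fun k => (k, pvInner (xs.count k) (pdfWEIGHTS.getD k 5))) := by
  rw [PySem.Dict.items_eq_map_keys _ (pvNodupA xs) PySem.Dict.empty, pvKeysA]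
  apply List.map_congr_left
  intro k hk
  have hx : k ∈ xs := (PySem.Set.mem_ofList xs k).1 hk
  have hc : xs.count k ≠ 0 := by
    have := List.count_pos_iff.2 hx; omega
  rw [PySem.Dict.getD_eq_get?_getD, pvGetA, if_neg hc]
  rfl

-- sum of count(k)·weight(k) over the distinct findings = sum of the weights over the list
lemma pvSumSet (xs : List String) :
    ((PySem.Set.ofList xs).map (fun k => ((xs.count k : Int)) * pdfWEIGHTS.getD k 5)).sum
      = (xs.map (fun f => pdfWEIGHTS.getD f 5)).sum := by
  induction xs using List.reverseRecOn with
  | nil => simp [PySem.Set.ofList_nil]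
  | append_singleton l x ih =>
    rw [PySem.Set.ofList_append_singleton]
    by_cases hx : x ∈ PySem.Set.ofList l
    · rw [PySem.Set.add_of_mem hx]
      have hnd := PySem.Set.nodup_ofList l
      have hxl : x ∈ l := (PySem.Set.mem_ofList l x).1 hx
      have key : ∀ (m : List String), m.Nodup → (hm : x ∈ m) →
          ((m.map (fun k => (((l ++ [x]).count k : Int)) * pdfWEIGHTS.getD k 5)).sum
            = (m.map (fun k => ((l.count k : Int)) * pdfWEIGHTS.getD k 5)).sum + pdfWEIGHTS.getD x 5) := by
        intro m hmnd hm
        have hp : List.Perm m (x :: m.erase x) := List.perm_cons_erase hm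
        have hxe : x ∉ m.erase x := hmnd.not_mem_erase
        rw [List.Perm.sum_eq (hp.map _), List.Perm.sum_eq (hp.map _)]
        simp only [List.map_cons, List.sum_cons]
        have h1 : ((l ++ [x]).count x : Int) = (l.count x : Int) + 1 := by
          simp
        have h2 : (m.erase x).map (fun k => (((l ++ [x]).count k : Int)) * pdfWEIGHTS.getD k 5)
            = (m.erase x).map (fun k => ((l.count k : Int)) * pdfWEIGHTS.getD k 5) := by
          apply List.map_congr_left
          intro k hk
          have : ¬ x = k := fun h => hxe (h ▸ hk)
          simp only [List.count_append, List.count_singleton]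
          simp [this]
        rw [h1, h2]; ring
      rw [key _ hnd hx, ih]
      simp
    · rw [PySem.Set.add_of_not_mem hx]
      have hxl : x ∉ l := fun h => hx ((PySem.Set.mem_ofList l x).2 h)
      rw [List.map_append, List.sum_append]
      have h2 : (PySem.Set.ofList l).map (fun k => (((l ++ [x]).count k : Int)) * pdfWEIGHTS.getD k 5)
          = (PySem.Set.ofList l).map (fun k => ((l.count k : Int)) * pdfWEIGHTS.getD k 5) := by
        apply List.map_congr_left
        intro k hk
        have : ¬ x = k := fun h => hxl ((PySem.Set.mem_ofList l x).1 (h ▸ hk))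
        simp only [List.count_append, List.count_singleton]
        simp [this]
      rw [h2, ih]
      simp [List.count_eq_zero_of_not_mem hxl]

lemma pvSumA (xs : List String) :
    xs.foldl (fun t f => t + pdfWEIGHTS.getD f 5) 0 =
      ((PySem.Dict.counter xs).items.map (fun p => p.2 * pdfWEIGHTS.getD p.1 5)).sum := by
  rw [PySem.List.foldl_add, PySem.Dict.items_counter, List.map_map]
  simp only [zero_add, Function.comp_def]
  exact (pvSumSet xs).symm

-- A's paired loop is the sum loop and the dict loop side by side
lemma pvFoldA (xs : List String) :
    xs.foldl
      (fun (st : Int × PySem.Dict String (PySem.Dict String Int)) finding =>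
        let weight := pdfWEIGHTS.getD finding 5
        let total_score := st.1 + weight
        let breakdown :=
          if st.2.contains finding then
            st.2.modify finding PySem.Dict.empty
              (fun inner => (inner.modify "count" 0 (· + 1)).modify "score" 0 (· + weight))
          else
            st.2.insert finding (PySem.Dict.ofList [("count", 1), ("score", weight)])
        (total_score, breakdown))
      (0, PySem.Dict.empty)
    = (xs.foldl (fun t f => t + pdfWEIGHTS.getD f 5) 0, pvDictA xs) := by
  unfold pvDictA
  rw [← PySem.List.foldl_prod_mk (f := fun t f => t + pdfWEIGHTS.getD f 5) (g := pvStepA)]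
  rfl

-- ===== VERDICT (by name: the statement is the Claim_ definition above) =====
theorem heuristic_scoring_spec : Claim_equal_heuristic_scoring := by
  intro xs _
  show heuristic_scoring xs = heuristic_scoring_alt xs
  simp only [heuristic_scoring, heuristic_scoring_alt]
  rw [pvFoldA xs]
  simp only [pvSumA xs]
  refine congrArg₂ Prod.mk rfl (congrArg₂ Prod.mk rfl ?_)
  rw [pvItemsA, List.map_map, PySem.Dict.items_counter, List.map_map]
  apply List.map_congr_left
  intro k hk
  rfl
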